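-- pv_equiv track=rewrite | github.com/gurjotk7/CS5103-PROJECT | unique_word3.py | unique_word
-- ===== SOURCE A (Python) =====
-- def unique_word(document_count, word, new_word):
--
--     num_of_lines = len(document_count.split('\n'))
--     num_of_chars = len(document_count.replace(' ', ''))
--
--     document_count = document_count.replace('\t', ' ').replace('\n', ' ')
--
--     frequency = document_count.split(' ')
--     word_count={}
--
--     for text in frequency:
--         if text == '':
--             continue
--         elif text == word:
--             text = new_word
--         if text not in word_count:
--             word_count[text] = 1
--         else:
--             word_count[text] += 1
--     return word_count, num_of_lines, num_of_chars
-- ===== SOURCE B (Python) =====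
-- def unique_word(document_count, word, new_word):
--     # Single fused character-level scan: tokenizes, substitutes and counts in one
--     # pass, instead of A's staged replace/split/dict pipeline.
--     word_count = {}
--     num_of_lines = 1
--     num_of_chars = 0
--     buf = []
--     for c in document_count:
--         if c == '\n':
--             num_of_lines += 1
--         if c != ' ':
--             num_of_chars += 1
--         if c == ' ' or c == '\t' or c == '\n':
--             if buf:
--                 t = ''.join(buf)
--                 if t == word:
--                     t = new_word
--                 word_count[t] = word_count.get(t, 0) + 1
--             buf = []
--         else:
--             buf.append(c)
--     if buf:
--         t = ''.join(buf)
--         if t == word: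
--             t = new_word
--         word_count[t] = word_count.get(t, 0) + 1
--     return word_count, num_of_lines, num_of_chars
-- ===== Notes on version B (the rewrite author's own statement) =====
-- stated objective: alternative
-- what changed: Replaced A's staged string pipeline (split/replace for the counts, replace-tab/newline then split-on-space then an insert-or-increment dict loop) by one fused character-level scan that maintains the line count, the non-space char count, a current-token buffer and the frequency dict in a single pass over the characters.
import Mathlib
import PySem

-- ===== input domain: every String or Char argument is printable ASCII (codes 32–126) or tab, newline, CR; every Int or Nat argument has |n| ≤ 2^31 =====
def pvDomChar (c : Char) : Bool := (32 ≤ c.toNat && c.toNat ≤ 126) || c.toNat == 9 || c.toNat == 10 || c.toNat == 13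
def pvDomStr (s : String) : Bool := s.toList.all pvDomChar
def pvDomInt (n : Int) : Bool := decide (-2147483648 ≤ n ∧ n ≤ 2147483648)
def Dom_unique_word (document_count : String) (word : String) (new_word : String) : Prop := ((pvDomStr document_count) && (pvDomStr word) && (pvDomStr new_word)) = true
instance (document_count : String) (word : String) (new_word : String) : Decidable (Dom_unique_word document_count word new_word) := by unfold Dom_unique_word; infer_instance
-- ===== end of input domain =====

-- B replaces A's staged string pipeline (split/replace for the counts, then
-- replace-tab/newline + split-on-space + insert-or-increment dict loop) by ONE
-- fused character-level scan maintaining line count, non-space char count, a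
-- token buffer and the frequency dict together (alternative decomposition,
-- not claimed faster).

-- ===== PORT A =====
def unique_word (document_count : String) (word : String) (new_word : String) : (List (String × Int)) × Int × Int :=
  let num_of_lines : Int := ((PySem.Str.split? document_count "\n").getD []).length  -- sep "\n" nonempty: split? always some here
  let num_of_chars : Int := PySem.Str.len (PySem.Str.replace document_count " " "")
  let document_count := PySem.Str.replace (PySem.Str.replace document_count "\t" " ") "\n" " "
  let frequency := (PySem.Str.split? document_count " ").getD []  -- sep " " nonempty: always some
  let word_count : PySem.Dict String Int :=
    frequency.foldl (fun d text =>
      if text = "" then d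
      else
        let text := if text = word then new_word else text
        if d.contains text = false then d.insert text 1
        else d.insert text (d.getD text 0 + 1)) PySem.Dict.empty
  (word_count.items, num_of_lines, num_of_chars)

-- ===== PORT B =====
-- B's flush of the pending token buffer ('if buf: t = ''.join(buf); …'),
-- shared by the loop body and the end of the scan exactly as in Source B
def uwFlush (word new_word : String) (d : PySem.Dict String Int) (buf : List Char) : PySem.Dict String Int :=
  if buf ≠ [] then
    let t := String.ofList buf
    let t := if t = word then new_word else t
    d.insert t (d.getD t 0 + 1)
  else d

-- B's loop body: state = (word_count, num_of_lines, num_of_chars, buf)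
def uwStep (word new_word : String) (st : PySem.Dict String Int × Int × Int × List Char) (c : Char) :
    PySem.Dict String Int × Int × Int × List Char :=
  let lines := if c = '\n' then st.2.1 + 1 else st.2.1
  let chars := if c ≠ ' ' then st.2.2.1 + 1 else st.2.2.1
  if c = ' ' ∨ c = '\t' ∨ c = '\n' then
    (uwFlush word new_word st.1 st.2.2.2, lines, chars, ([] : List Char))
  else (st.1, lines, chars, st.2.2.2 ++ [c])

def unique_word_alt (document_count : String) (word : String) (new_word : String) : (List (String × Int)) × Int × Int :=
  let st := document_count.toList.foldl (uwStep word new_word) (PySem.Dict.empty, 1, 0, [])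
  ((uwFlush word new_word st.1 st.2.2.2).items, st.2.1, st.2.2.1)

-- ===== PRECONDITION & SPEC =====
def Spec_unique_word (document_count : String) (word : String) (new_word : String) (out : (List (String × Int)) × Int × Int) : Prop := out = unique_word_alt document_count word new_word
instance (document_count : String) (word : String) (new_word : String) (out : (List (String × Int)) × Int × Int) : Decidable (Spec_unique_word document_count word new_word out) := by unfold Spec_unique_word; infer_instance

-- ===== CLAIM =====
def Claim_equal_unique_word : Prop := ∀ (document_count : String) (word : String) (new_word : String), Dom_unique_word document_count word new_word → Spec_unique_word document_count word new_word (unique_word document_count word new_word)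

-- ===== LEMMAS AND PROOFS =====

-- what A's two replaces do to one character
def uwSub (c : Char) : Char := if c = '\t' then ' ' else if c = '\n' then ' ' else c

-- apply f to the head piece only
def uwMapHead (f : List Char → List Char) : List (List Char) → List (List Char)
  | [] => []
  | p :: ps => f p :: ps

-- split on a single character (spec for Chars.splitOn with a one-char sep)
def uwSplit1 (a : Char) : List Char → List (List Char)
  | [] => [[]]
  | c :: cs => if c = a then [] :: uwSplit1 a cs else uwMapHead (c :: ·) (uwSplit1 a cs)

-- A's word→new_word substitution on a finished token
def uwSubst (word new_word : String) (t : List Char) : String :=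
  if String.ofList t = word then new_word else String.ofList t

-- the token stream produced by the scan starting with buffer buf
def uwToks (word new_word : String) (buf : List Char) : List Char → List String
  | [] => if buf = [] then [] else [uwSubst word new_word buf]
  | c :: cs => if c = ' ' ∨ c = '\t' ∨ c = '\n' then
      (if buf = [] then [] else [uwSubst word new_word buf]) ++ uwToks word new_word [] cs
    else uwToks word new_word (buf ++ [c]) cs

theorem uwSplit1_ne_nil (a : Char) (cs : List Char) : uwSplit1 a cs ≠ [] := by
  cases cs with
  | nil => simp [uwSplit1]
  | cons c cs =>
    simp only [uwSplit1]
    split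
    · simp
    · cases h : uwSplit1 a cs with
      | nil => exact absurd h (by induction cs <;> simp [uwSplit1, uwMapHead] <;> split <;> simp_all [uwMapHead] <;> split <;> simp_all)
      | cons p ps => simp [uwMapHead]

theorem uw_replace_go (a : Char) (new : List Char) :
    ∀ (fuel : Nat) (l acc : List Char), l.length ≤ fuel →
      PySem.Chars.replace.go [a] new fuel l acc
        = acc.reverse ++ l.flatMap (fun c => if c = a then new else [c]) := by
  intro fuel
  induction fuel with
  | zero =>
    intro l acc h
    have : l = [] := by cases l <;> simp_all
    subst this; simp [PySem.Chars.replace.go]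
  | succ n ih =>
    intro l acc h
    cases l with
    | nil => simp [PySem.Chars.replace.go]
    | cons c t =>
      simp only [PySem.Chars.replace.go, List.isPrefixOf]
      by_cases hc : c = a
      · subst hc
        simp only [beq_self_eq_true, Bool.and_true, List.isPrefixOf_nil_left, if_true,
          List.length_cons, List.drop_succ_cons, List.drop_zero, List.length_nil]
        rw [ih t (new.reverse ++ acc) (by simpa using h)]
        simp [List.flatMap_cons]
      · have hba : (a == c) = false := by simp [Ne.symm hc]
        simp only [hba, Bool.false_and, Bool.false_eq_true, if_false]
        rw [ih t (c :: acc) (by simpa using h)]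
        simp [List.flatMap_cons, hc]

theorem uw_replace_one (a : Char) (new : List Char) (cs : List Char) :
    PySem.Chars.replace cs [a] new = cs.flatMap (fun c => if c = a then new else [c]) := by
  simpa [PySem.Chars.replace] using uw_replace_go a new cs.length cs [] le_rfl

theorem uw_splitOn_go (a : Char) :
    ∀ (fuel : Nat) (l cur : List Char) (acc : List (List Char)), l.length ≤ fuel →
      PySem.Chars.splitOn.go [a] fuel l cur acc
        = acc.reverse ++ uwMapHead (cur.reverse ++ ·) (uwSplit1 a l) := by
  intro fuel
  induction fuel with
  | zero =>
    intro l cur acc h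
    have : l = [] := by cases l <;> simp_all
    subst this; simp [PySem.Chars.splitOn.go, uwSplit1, uwMapHead]
  | succ n ih =>
    intro l cur acc h
    cases l with
    | nil => simp [PySem.Chars.splitOn.go, uwSplit1, uwMapHead]
    | cons c t =>
      simp only [PySem.Chars.splitOn.go, List.isPrefixOf]
      by_cases hc : c = a
      · subst hc
        simp only [beq_self_eq_true, Bool.and_true, List.isPrefixOf_nil_left, if_true,
          List.length_cons, List.drop_succ_cons, List.drop_zero, List.length_nil]
        rw [ih t [] (cur.reverse :: acc) (by simpa using h)]
        cases ht : uwSplit1 c t with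
        | nil => exact absurd ht (uwSplit1_ne_nil c t)
        | cons p ps => simp [uwSplit1, uwMapHead, ht]
      · have hba : (a == c) = false := by simp [Ne.symm hc]
        simp only [hba, Bool.false_and, Bool.false_eq_true, if_false]
        rw [ih t (c :: cur) acc (by simpa using h)]
        cases ht : uwSplit1 a t with
        | nil => exact absurd ht (uwSplit1_ne_nil a t)
        | cons p ps => simp [uwSplit1, uwMapHead, ht, hc]

theorem uw_splitOn_one (a : Char) (cs : List Char) :
    PySem.Chars.splitOn cs [a] = uwSplit1 a cs := by
  rw [PySem.Chars.splitOn, uw_splitOn_go a (cs.length + 1) cs [] [] (by omega)]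
  cases h : uwSplit1 a cs with
  | nil => exact absurd h (uwSplit1_ne_nil a cs)
  | cons p ps => simp [uwMapHead]

theorem uwMapHead_length (f : List Char → List Char) (l : List (List Char)) :
    (uwMapHead f l).length = l.length := by cases l <;> simp [uwMapHead]

theorem uw_length_split1 (a : Char) (cs : List Char) :
    (uwSplit1 a cs).length = cs.count a + 1 := by
  induction cs with
  | nil => simp [uwSplit1]
  | cons c cs ih =>
    simp only [uwSplit1]
    by_cases hc : c = a
    · subst hc; simp [ih, List.count_cons]
    · simp only [hc, if_false, uwMapHead_length, ih]
      simp [List.count_cons, hc]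

theorem uwMapHead_nil (l : List (List Char)) : uwMapHead (([] : List Char) ++ ·) l = l := by
  cases l <;> simp [uwMapHead]

-- the scanner's token stream is A's filtered substituted split
theorem uw_toks_eq (word new_word : String) :
    ∀ (cs buf : List Char),
      uwToks word new_word buf cs
        = ((uwMapHead (buf ++ ·) (uwSplit1 ' ' (cs.map uwSub))).filter (· ≠ [])).map
            (uwSubst word new_word) := by
  intro cs
  induction cs with
  | nil =>
    intro buf
    by_cases hb : buf = [] <;> simp_all [uwToks, uwSplit1, uwMapHead, List.filter_cons]
  | cons c cs ih =>
    intro buf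
    by_cases hs : c = ' ' ∨ c = '\t' ∨ c = '\n'
    · have hsub : uwSub c = ' ' := by
        rcases hs with h | h | h <;> subst h <;> simp [uwSub]
      simp only [uwToks, hs, if_true, List.map_cons, hsub, uwSplit1, ih []]
      rw [uwMapHead_nil]
      by_cases hb : buf = [] <;> simp_all [uwMapHead, List.filter_cons]
    · push_neg at hs
      obtain ⟨h1, h2, h3⟩ := hs
      have hsub : uwSub c = c := by simp [uwSub, h2, h3]
      have hns : ¬ (c = ' ' ∨ c = '\t' ∨ c = '\n') := by tauto
      simp only [uwToks, hns, if_false, List.map_cons, hsub, uwSplit1, h1, ih (buf ++ [c])]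
      cases ht : uwSplit1 ' ' (cs.map uwSub) with
      | nil => exact absurd ht (uwSplit1_ne_nil _ _)
      | cons p ps =>
        simp only [uwMapHead]
        have hap : buf ++ [c] ++ [] ++ p = buf ++ c :: p := by simp
        simp [h2, h3, hap]

-- one fused scan step = counts + token-fold (the loop invariant of B)
theorem uw_scan (word new_word : String) :
    ∀ (cs : List Char) (d : PySem.Dict String Int) (lines chars : Int) (buf : List Char),
      (uwFlush word new_word (cs.foldl (uwStep word new_word) (d, lines, chars, buf)).1
          (cs.foldl (uwStep word new_word) (d, lines, chars, buf)).2.2.2,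
        (cs.foldl (uwStep word new_word) (d, lines, chars, buf)).2.1,
        (cs.foldl (uwStep word new_word) (d, lines, chars, buf)).2.2.1)
      = ((uwToks word new_word buf cs).foldl (fun d t => d.insert t (d.getD t 0 + 1)) d,
          lines + (cs.count '\n' : Int), chars + ((cs.countP (· ≠ ' ')) : Int)) := by
  intro cs
  induction cs with
  | nil =>
    intro d lines chars buf
    by_cases hb : buf = [] <;> simp_all [uwToks, uwFlush, uwSubst]
  | cons c cs ih =>
    intro d lines chars buf
    simp only [List.foldl_cons]
    by_cases hs : c = ' ' ∨ c = '\t' ∨ c = '\n'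
    · have hstep : uwStep word new_word (d, lines, chars, buf) c
          = (uwFlush word new_word d buf,
             (if c = '\n' then lines + 1 else lines),
             (if c ≠ ' ' then chars + 1 else chars), ([] : List Char)) := by
        simp [uwStep, hs]
      rw [hstep, ih]
      simp only [uwToks, hs, if_true, Prod.mk.injEq]
      refine ⟨?_, ?_, ?_⟩
      · rw [List.foldl_append]
        by_cases hb : buf = [] <;> simp_all [uwFlush, uwSubst]
      · by_cases hn : c = '\n' <;> simp [hn, List.count_cons] <;> push_cast <;> ring
      · by_cases hsp : c = ' ' <;> simp [hsp, List.countP_cons] <;> push_cast <;> ring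
    · have hstep : uwStep word new_word (d, lines, chars, buf) c
          = (d, lines, chars + 1, buf ++ [c]) := by
        push_neg at hs
        simp [uwStep, hs.1, hs.2.1, hs.2.2, fun h => hs.2.2 h]
      rw [hstep, ih]
      push_neg at hs
      simp only [uwToks, Prod.mk.injEq]
      rw [if_neg (by push_neg; exact hs)]
      refine ⟨rfl, ?_, ?_⟩
      · simp [List.count_cons, hs.2.2]
      · simp only [List.countP_cons]
        have hdec : (decide (c ≠ ' ')) = true := by simp [hs.1]
        simp only [hdec]
        push_cast; ring

-- A's insert-or-increment branch is exactly Counter's modify step.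
theorem uw_step_eq_modify (d : PySem.Dict String Int) (t : String) :
    (if d.contains t = false then d.insert t 1 else d.insert t (d.getD t 0 + 1))
      = d.modify t 0 (· + 1) := by
  by_cases h : d.contains t = false
  · rw [if_pos h]
    have hm : d.modify t 0 (· + 1) = d.insert t (d.getD t 0 + 1) := rfl
    rw [hm, PySem.Dict.getD_of_not_contains d 0 h, zero_add]
  · rw [if_neg h]; rfl

-- A's loop over the raw split pieces is the Counter fold over the substituted filtered tokens.
theorem uw_fold_eq (word new_word : String) (l : List String) (d : PySem.Dict String Int) :
    l.foldl (fun d text =>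
      if text = "" then d
      else
        let text := if text = word then new_word else text
        if d.contains text = false then d.insert text 1
        else d.insert text (d.getD text 0 + 1)) d
      = ((l.filter (fun t => t ≠ "")).map (fun t => if t = word then new_word else t)).foldl
          (fun d x => d.modify x 0 (· + 1)) d := by
  induction l generalizing d with
  | nil => rfl
  | cons a l ih =>
    by_cases h : a = ""
    · subst h
      simp [List.filter_cons, ih]
    · have hstep : (if a = "" then d
          else
            let text := if a = word then new_word else a
            if d.contains text = false then d.insert text 1
            else d.insert text (d.getD text 0 + 1))
          = d.modify (if a = word then new_word else a) 0 (· + 1) := by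
        rw [if_neg h]
        exact uw_step_eq_modify d (if a = word then new_word else a)
      rw [List.foldl_cons, hstep, ih]
      simp [List.filter_cons, h]

-- length of A's space-erasing replace
theorem uw_len_erase (cs : List Char) :
    (cs.flatMap (fun c => if c = ' ' then [] else [c])).length = cs.countP (· ≠ ' ') := by
  induction cs with
  | nil => simp
  | cons c cs ih =>
    by_cases h : c = ' ' <;> simp [List.flatMap_cons, h, ih, List.countP_cons]

-- A's two single-char replaces act as one charwise map
theorem uw_clean_eq (cs : List Char) :
    PySem.Chars.replace (PySem.Chars.replace cs ['\t'] [' ']) ['\n'] [' '] = cs.map uwSub := by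
  rw [uw_replace_one, uw_replace_one]
  have h1 : ∀ l : List Char, l.flatMap (fun c => if c = '\t' then [' '] else [c])
      = l.map (fun c => if c = '\t' then ' ' else c) := by
    intro l; induction l with
    | nil => simp
    | cons c l ih => by_cases h : c = '\t' <;> simp [List.flatMap_cons, h, ih]
  have h2 : ∀ l : List Char, l.flatMap (fun c => if c = '\n' then [' '] else [c])
      = l.map (fun c => if c = '\n' then ' ' else c) := by
    intro l; induction l with
    | nil => simp
    | cons c l ih => by_cases h : c = '\n' <;> simp [List.flatMap_cons, h, ih]
  rw [h1, h2, List.map_map]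
  refine List.map_congr_left ?_
  intro c _
  by_cases ht : c = '\t' <;> by_cases hn : c = '\n' <;> simp [uwSub, Function.comp, ht, hn]

-- filtering the empty string commutes with ofList, and substitution after ofList is uwSubst
theorem uw_strings_eq (word new_word : String) (l : List (List Char)) :
    (((l.map String.ofList).filter (fun t => t ≠ "")).map (fun t => if t = word then new_word else t))
      = (l.filter (· ≠ [])).map (uwSubst word new_word) := by
  induction l with
  | nil => simp
  | cons p ps ih =>
    by_cases h : p = []
    · subst h; simp_all [List.filter_cons]
    · have h' : String.ofList p ≠ "" := by simpa [String.ofList_eq_empty_iff] using h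
      simp_all [List.filter_cons, uwSubst]

-- the scanner's tokens from an empty buffer are exactly A's token list (string level)
theorem uw_tokens_main (word new_word : String) (dc : String) :
    ((((PySem.Str.split? (PySem.Str.replace (PySem.Str.replace dc "\t" " ") "\n" " ") " ").getD []).filter
        (fun t => t ≠ "")).map (fun t => if t = word then new_word else t))
      = uwToks word new_word [] dc.toList := by
  have htl : (PySem.Str.replace (PySem.Str.replace dc "\t" " ") "\n" " ").toList
      = dc.toList.map uwSub := by
    rw [PySem.Str.toList_replace, PySem.Str.toList_replace]
    exact uw_clean_eq dc.toList
  have hsplit : (PySem.Str.split? (PySem.Str.replace (PySem.Str.replace dc "\t" " ") "\n" " ") " ").getD []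
      = (uwSplit1 ' ' (dc.toList.map uwSub)).map String.ofList := by
    simp [PySem.Str.split?, PySem.Chars.split?, htl, uw_splitOn_one]
  rw [hsplit, uw_strings_eq, uw_toks_eq, uwMapHead_nil]

-- ===== VERDICT =====
theorem unique_word_spec : Claim_equal_unique_word := by
  intro dc word new_word _
  unfold Spec_unique_word unique_word unique_word_alt
  have hscan := uw_scan word new_word dc.toList PySem.Dict.empty 1 0 []
  have hD := congrArg Prod.fst hscan
  have hL := congrArg (fun p => p.2.1) hscan
  have hC := congrArg (fun p => p.2.2) hscan
  simp only at hD hL hC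
  simp only [Prod.mk.injEq]
  refine ⟨?_, ?_, ?_⟩
  · -- frequency dicts agree
    rw [hD, uw_fold_eq, uw_tokens_main]
    rw [PySem.Dict.foldl_insert_getD_add_one_eq_counter, PySem.Dict.counter_eq_foldl]
  · -- line counts agree
    rw [hL]
    have hsplit : (PySem.Str.split? dc "\n").getD [] = (uwSplit1 '\n' dc.toList).map String.ofList := by
      simp [PySem.Str.split?, PySem.Chars.split?, uw_splitOn_one]
    rw [hsplit]
    simp [uw_length_split1]
    ring
  · -- char counts agree
    rw [hC]
    have : (PySem.Str.replace dc " " "").toList = dc.toList.flatMap (fun c => if c = ' ' then [] else [c]) := by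
      rw [PySem.Str.toList_replace]
      exact uw_replace_one ' ' [] dc.toList
    rw [PySem.Str.len_eq, this, uw_len_erase]
    ring
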